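-- pv_equiv track=rewrite | github.com/SimonGenin/odoo-assets-scripts | convert-cli.py | sort_actions
-- ===== SOURCE A (Python) =====
-- def sort_actions(actions):
--     after = []
--     end = []
--     other = []
--     for action in actions:
--         if 'end' in action[0]:
--             end.append(action)
--         elif 'after' in action[0]:
--             after.append(action)
--         else:
--             other.append(action)
--     return other + after + end
-- ===== SOURCE B (Python) =====
-- def sort_actions(actions):
--     def rank(a):
--         return 2 if 'end' in a[0] else 1 if 'after' in a[0] else 0
--     return ([a for a in actions if rank(a) == 0]
--             + [a for a in actions if rank(a) == 1]
--             + [a for a in actions if rank(a) == 2])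
-- ===== Notes on version B (the rewrite author's own statement) =====
-- stated objective: idiomatic
-- what changed: Replaces the single loop maintaining three mutable accumulator lists with a rank function and three filter comprehensions concatenated, one per rank group.
import Mathlib
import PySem

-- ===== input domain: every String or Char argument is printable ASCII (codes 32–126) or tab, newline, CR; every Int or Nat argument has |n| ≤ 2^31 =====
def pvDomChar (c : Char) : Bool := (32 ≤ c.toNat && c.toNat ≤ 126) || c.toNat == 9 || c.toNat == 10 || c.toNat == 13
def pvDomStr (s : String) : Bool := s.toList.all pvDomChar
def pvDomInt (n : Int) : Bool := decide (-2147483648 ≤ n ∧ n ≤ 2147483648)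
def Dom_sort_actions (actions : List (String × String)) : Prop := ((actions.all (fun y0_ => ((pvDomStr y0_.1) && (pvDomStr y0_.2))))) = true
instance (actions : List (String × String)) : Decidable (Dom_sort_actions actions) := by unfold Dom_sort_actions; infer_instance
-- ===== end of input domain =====

-- B replaces A's single loop with three accumulator lists by a rank function and
-- three filter passes concatenated (idiomatic; same O(n) cost, return value identical).

-- ===== PORT A =====
-- loop body: state = (after, end, other), each bucket appended at the back exactly as Python's .append
def pvStep (st : List (String × String) × List (String × String) × List (String × String))
    (action : String × String) :
    List (String × String) × List (String × String) × List (String × String) :=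
  if PySem.Str.isIn "end" action.1 then (st.1, st.2.1 ++ [action], st.2.2)
  else if PySem.Str.isIn "after" action.1 then (st.1 ++ [action], st.2.1, st.2.2)
  else (st.1, st.2.1, st.2.2 ++ [action])

def sort_actions (actions : List (String × String)) : List (String × String) :=
  let st := actions.foldl pvStep ([], [], [])
  st.2.2 ++ st.1 ++ st.2.1

-- ===== PORT B =====
def pvRank (a : String × String) : Nat :=
  if PySem.Str.isIn "end" a.1 then 2 else if PySem.Str.isIn "after" a.1 then 1 else 0

def sort_actions_alt (actions : List (String × String)) : List (String × String) :=
  actions.filter (fun a => pvRank a == 0)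
    ++ actions.filter (fun a => pvRank a == 1)
    ++ actions.filter (fun a => pvRank a == 2)

-- ===== PRECONDITION & SPEC =====
def Spec_sort_actions (actions : List (String × String)) (out : List (String × String)) : Prop := out = sort_actions_alt actions
instance (actions : List (String × String)) (out : List (String × String)) : Decidable (Spec_sort_actions actions out) := by unfold Spec_sort_actions; infer_instance

-- ===== CLAIM (what is proved, stated in full; the proofs are below) =====
def Claim_equal_sort_actions : Prop := ∀ (actions : List (String × String)), Dom_sort_actions actions → Spec_sort_actions actions (sort_actions actions)

-- ===== LEMMAS AND PROOFS =====

-- loop invariant: A's fold extends each bucket with the corresponding rank filter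
theorem pv_loop_filter (actions : List (String × String))
    (af e o : List (String × String)) :
    actions.foldl pvStep (af, e, o)
    = (af ++ actions.filter (fun a => pvRank a == 1),
       e ++ actions.filter (fun a => pvRank a == 2),
       o ++ actions.filter (fun a => pvRank a == 0)) := by
  induction actions generalizing af e o with
  | nil => simp
  | cons a t ih =>
    rw [List.foldl_cons]
    by_cases h1 : PySem.Str.isIn "end" a.1 = true
    · have hs : pvStep (af, e, o) a = (af, e ++ [a], o) := by
        unfold pvStep; rw [if_pos h1]
      have hr : pvRank a = 2 := by unfold pvRank; rw [if_pos h1]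
      rw [hs, ih]
      simp [hr, List.append_assoc]
    · by_cases h2 : PySem.Str.isIn "after" a.1 = true
      · have hs : pvStep (af, e, o) a = (af ++ [a], e, o) := by
          unfold pvStep; rw [if_neg h1, if_pos h2]
        have hr : pvRank a = 1 := by unfold pvRank; rw [if_neg h1, if_pos h2]
        rw [hs, ih]
        simp [hr, List.append_assoc]
      · have hs : pvStep (af, e, o) a = (af, e, o ++ [a]) := by
          unfold pvStep; rw [if_neg h1, if_neg h2]
        have hr : pvRank a = 0 := by unfold pvRank; rw [if_neg h1, if_neg h2]
        rw [hs, ih]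
        simp [hr, List.append_assoc]

-- ===== VERDICT (by name: the statement is the Claim_ definition above) =====
theorem sort_actions_spec : Claim_equal_sort_actions := by
  intro actions _
  show sort_actions actions = sort_actions_alt actions
  unfold sort_actions sort_actions_alt
  rw [pv_loop_filter]
  simp [List.append_assoc]
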